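-- pv_equiv track=rewrite | github.com/magik2art/synergy_keis_1 | main.py | sum_negatives_between_extremes
-- ===== SOURCE A (Python) =====
-- def sum_negatives_between_extremes(arr):
--     """
--     Возвращает словарь с:
--     - sum: сумма отрицательных элементов между max и min
--     - max_value, max_index: значение и индекс первого максимума
--     - min_value, min_index: значение и индекс первого минимума
--     - left, right: границы интервала между ними (включительно)
--     """
--     if len(arr) == 0:
--         return {
--             "sum": 0,
--             "max_value": None,
--             "max_index": None,
--             "min_value": None,
--             "min_index": None,
--             "left": None,
--             "right": None,
--         }
--
--     # Находим индексы первого максимума и первого минимума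
--     max_value = arr[0]
--     min_value = arr[0]
--     max_index = 0
--     min_index = 0
--
--     for i in range(1, len(arr)):
--         if arr[i] > max_value:
--             max_value = arr[i]
--             max_index = i
--         if arr[i] < min_value:
--             min_value = arr[i]
--             min_index = i
--
--     # Индексы интервала между ними
--     left = min(min_index, max_index) + 1
--     right = max(min_index, max_index) - 1
--
--     # Если между максимумом и минимумом нет элементов
--     if left > right:
--         return {
--             "sum": 0,
--             "max_value": max_value,
--             "max_index": max_index,
--             "min_value": min_value,
--             "min_index": min_index,
--             "left": left,
--             "right": right,
--         }
--
--     # Суммируем только отрицательные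
--     subsegment = arr[left:right + 1]
--     result_sum = sum(x for x in subsegment if x < 0)
--
--     return {
--         "sum": result_sum,
--         "max_value": max_value,
--             "max_index": max_index,
--         "min_value": min_value,
--         "min_index": min_index,
--         "left": left,
--         "right": right,
--     }
-- ===== SOURCE B (Python) =====
-- def sum_negatives_between_extremes(arr):
--     """Sort-based alternative: the first max / first min positions are read off
--     as the heads of two stable sorts of the index range by (value, index) and
--     (-value, index); the left>right guard disappears because the slice is
--     empty there anyway."""
--     if len(arr) == 0:
--         return {
--             "sum": 0,
--             "max_value": None,
--             "max_index": None,
--             "min_value": None,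
--             "min_index": None,
--             "left": None,
--             "right": None,
--         }
--     n = len(arr)
--     min_index = sorted(range(n), key=lambda i: (arr[i], i))[0]
--     max_index = sorted(range(n), key=lambda i: (-arr[i], i))[0]
--     min_value = arr[min_index]
--     max_value = arr[max_index]
--     left = min(min_index, max_index) + 1
--     right = max(min_index, max_index) - 1
--     return {
--         "sum": sum(x for x in arr[left:right + 1] if x < 0),
--         "max_value": max_value,
--         "max_index": max_index,
--         "min_value": min_value,
--         "min_index": min_index,
--         "left": left,
--         "right": right,
--     }
-- ===== Notes on version B (the rewrite author's own statement) =====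
-- stated objective: alternative
-- what changed: The manual combined loop tracking running max/min and their first indices is replaced by a sort-based argmin/argmax: the first-min and first-max positions are the heads of two stable sorts of the index range keyed by (value, index) and (-value, index), and the left>right early-return branch is dropped since the slice is empty there anyway.
import Mathlib
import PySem

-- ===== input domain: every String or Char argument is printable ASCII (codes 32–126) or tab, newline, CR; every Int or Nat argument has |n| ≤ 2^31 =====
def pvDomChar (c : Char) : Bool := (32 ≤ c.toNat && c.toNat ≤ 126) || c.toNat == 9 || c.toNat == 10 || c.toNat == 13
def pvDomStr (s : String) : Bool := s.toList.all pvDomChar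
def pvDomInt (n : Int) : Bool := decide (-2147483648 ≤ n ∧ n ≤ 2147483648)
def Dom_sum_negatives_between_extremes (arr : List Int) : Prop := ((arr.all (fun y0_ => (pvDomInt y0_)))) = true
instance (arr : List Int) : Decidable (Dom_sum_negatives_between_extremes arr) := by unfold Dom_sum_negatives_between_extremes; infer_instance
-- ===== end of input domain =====

-- B replaces A's manual combined max/min/index loop by a sort-based argmin/argmax
-- (heads of two stable sorts of the index range, keyed by (value, index) and
-- (-value, index)); the left>right early-return branch is dropped since the
-- slice is empty there anyway. Alternative algorithm, not claimed faster.

-- ===== PORT A =====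
-- A-side helper: the body of A's `for i in range(1, len(arr))` loop.
-- State s = (max_value, max_index, min_value, min_index).
def pvStepA (arr : List Int) (s : Int × Int × Int × Int) (i : Int) : Int × Int × Int × Int :=
  let v := PySem.List.pyGetD arr i 0
  let s := if s.1 < v then (v, i, s.2.2.1, s.2.2.2) else s
  if v < s.2.2.1 then (s.1, s.2.1, v, i) else s

def sum_negatives_between_extremes (arr : List Int) : List (String × Option Int) :=
  if arr.length = 0 then
    [("sum", some 0), ("max_value", none), ("max_index", none),
     ("min_value", none), ("min_index", none), ("left", none), ("right", none)]
  else
    let st := (PySem.List.pyRange 1 (PySem.List.len arr)).foldl (pvStepA arr)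
      (PySem.List.pyGetD arr 0 0, 0, PySem.List.pyGetD arr 0 0, 0)
    let maxValue := st.1
    let maxIndex := st.2.1
    let minValue := st.2.2.1
    let minIndex := st.2.2.2
    let left := min minIndex maxIndex + 1
    let right := max minIndex maxIndex - 1
    if left > right then
      [("sum", some 0), ("max_value", some maxValue), ("max_index", some maxIndex),
       ("min_value", some minValue), ("min_index", some minIndex),
       ("left", some left), ("right", some right)]
    else
      let subsegment := PySem.List.slice arr (some left) (some (right + 1))
      let resultSum := (subsegment.filter (fun x => x < 0)).sum
      [("sum", some resultSum), ("max_value", some maxValue), ("max_index", some maxIndex),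
       ("min_value", some minValue), ("min_index", some minIndex),
       ("left", some left), ("right", some right)]

-- ===== PORT B =====
-- sorted(range(n), key=lambda i: (arr[i], i))[0] / (-arr[i], i): the index list
-- is nonempty here, so the Python [0] cannot raise and is ported as headD 0.
def sum_negatives_between_extremes_alt (arr : List Int) : List (String × Option Int) :=
  if arr.length = 0 then
    [("sum", some 0), ("max_value", none), ("max_index", none),
     ("min_value", none), ("min_index", none), ("left", none), ("right", none)]
  else
    let n := PySem.List.len arr
    let minIndex := (PySem.List.sorted2 (PySem.List.pyRange 0 n)
      (fun i => PySem.List.pyGetD arr i 0) (fun i => i)).headD 0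
    let maxIndex := (PySem.List.sorted2 (PySem.List.pyRange 0 n)
      (fun i => -(PySem.List.pyGetD arr i 0)) (fun i => i)).headD 0
    let minValue := PySem.List.pyGetD arr minIndex 0
    let maxValue := PySem.List.pyGetD arr maxIndex 0
    let left := min minIndex maxIndex + 1
    let right := max minIndex maxIndex - 1
    [("sum", some ((PySem.List.slice arr (some left) (some (right + 1))).filter (fun x => x < 0)).sum),
     ("max_value", some maxValue), ("max_index", some maxIndex),
     ("min_value", some minValue), ("min_index", some minIndex),
     ("left", some left), ("right", some right)]

-- ===== PRECONDITION & SPEC =====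
def Spec_sum_negatives_between_extremes (arr : List Int) (out : List (String × Option Int)) : Prop := out = sum_negatives_between_extremes_alt arr
instance (arr : List Int) (out : List (String × Option Int)) : Decidable (Spec_sum_negatives_between_extremes arr out) := by unfold Spec_sum_negatives_between_extremes; infer_instance

-- ===== CLAIM (what is proved, stated in full; the proofs are below) =====
def Claim_equal_sum_negatives_between_extremes : Prop := ∀ (arr : List Int), Dom_sum_negatives_between_extremes arr → Spec_sum_negatives_between_extremes arr (sum_negatives_between_extremes arr)

-- ===== LEMMAS AND PROOFS =====

-- the quadruple (max, first argmax, min, first argmin) that both programs compute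
def pvSpecState (arr : List Int) : Int × Int × Int × Int :=
  let M := (PySem.List.max? arr (fun y => y)).getD 0
  let m := (PySem.List.min? arr (fun y => y)).getD 0
  (M, ((PySem.List.index? arr M).getD 0 : Nat), m, ((PySem.List.index? arr m).getD 0 : Nat))

theorem pvMax_snoc (L : List Int) (y M : Int) (h : PySem.List.max? L (fun y => y) = some M) :
    PySem.List.max? (L ++ [y]) (fun y => y) = if M < y then some y else some M := by
  simp [PySem.List.max?, List.foldl_append]
  simp [PySem.List.max?] at h
  rw [h]

theorem pvMin_snoc (L : List Int) (y m : Int) (h : PySem.List.min? L (fun y => y) = some m) :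
    PySem.List.min? (L ++ [y]) (fun y => y) = if y < m then some y else some m := by
  simp [PySem.List.min?, List.foldl_append]
  simp [PySem.List.min?] at h
  rw [h]

-- one step of A's loop at the appended element preserves the spec quadruple
theorem pvStep_snoc (x : Int) (l : List Int) (y : Int) :
    pvStepA ((x :: l) ++ [y]) (pvSpecState (x :: l)) ((x :: l).length : Int)
      = pvSpecState ((x :: l) ++ [y]) := by
  set L := x :: l with hL
  obtain ⟨M, hM⟩ : ∃ M, PySem.List.max? L (fun y => y) = some M := by
    cases h : PySem.List.max? L (fun y => y) with
    | none => rw [PySem.List.max?_eq_none_iff] at h; simp [hL] at h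
    | some M => exact ⟨M, rfl⟩
  obtain ⟨m, hm⟩ : ∃ m, PySem.List.min? L (fun y => y) = some m := by
    cases h : PySem.List.min? L (fun y => y) with
    | none => rw [PySem.List.min?_eq_none_iff] at h; simp [hL] at h
    | some m => exact ⟨m, rfl⟩
  have hMmem : M ∈ L := PySem.List.max?_mem hM
  have hmmem : m ∈ L := PySem.List.min?_mem hm
  have hv : PySem.List.pyGetD (L ++ [y]) (L.length : Int) 0 = y := by
    rw [PySem.List.pyGetD_natCast]
    simp
  have hML : PySem.List.max? (L ++ [y]) (fun y => y) = if M < y then some y else some M :=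
    pvMax_snoc L y M hM
  have hmL : PySem.List.min? (L ++ [y]) (fun y => y) = if y < m then some y else some m :=
    pvMin_snoc L y m hm
  have hmM : m ≤ M := le_trans (PySem.List.min?_isMin hm M hMmem) (le_refl M)
  unfold pvStepA pvSpecState
  rw [hv, hM, hm, hML, hmL]
  by_cases h1 : M < y
  · have hynotin : y ∉ L := fun hy => absurd (PySem.List.max?_isMax hM y hy) (not_le.mpr h1)
    have hidx : PySem.List.index? (L ++ [y]) y = some L.length :=
      PySem.List.index?_append_singleton_self L y hynotin
    have hnlt : ¬ y < m := not_lt.mpr (le_trans hmM (le_of_lt h1))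
    have hidxm : PySem.List.index? (L ++ [y]) m = PySem.List.index? L m :=
      PySem.List.index?_append_of_mem [y] hmmem
    simp only [PySem.List.index?_eq_idxOf?] at hidx hidxm
    simp [h1, hnlt, hidx, hidxm]
  · have hidxM : PySem.List.index? (L ++ [y]) M = PySem.List.index? L M :=
      PySem.List.index?_append_of_mem [y] hMmem
    by_cases h2 : y < m
    · have hynotin : y ∉ L := fun hy => absurd (PySem.List.min?_isMin hm y hy) (not_le.mpr h2)
      have hidx : PySem.List.index? (L ++ [y]) y = some L.length :=
        PySem.List.index?_append_singleton_self L y hynotin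
      simp only [PySem.List.index?_eq_idxOf?] at hidx hidxM
      simp [h1, h2, hidx, hidxM]
    · have hidxm : PySem.List.index? (L ++ [y]) m = PySem.List.index? L m :=
        PySem.List.index?_append_of_mem [y] hmmem
      simp only [PySem.List.index?_eq_idxOf?] at hidxM hidxm
      simp [h1, h2, hidxM, hidxm]

-- A's whole loop computes exactly the quadruple pvSpecState
theorem pvLoop_spec (x : Int) (t : List Int) :
    (PySem.List.pyRange 1 (PySem.List.len (x :: t))).foldl (pvStepA (x :: t))
      (PySem.List.pyGetD (x :: t) 0 0, 0, PySem.List.pyGetD (x :: t) 0 0, 0)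
      = pvSpecState (x :: t) := by
  induction t using List.reverseRecOn with
  | nil =>
    simp [PySem.List.len_eq, PySem.List.pyRange_one_eq_nil, pvSpecState,
      PySem.List.max?, PySem.List.min?, PySem.List.pyGetD]
  | append_singleton l y ih =>
    have hcons : x :: (l ++ [y]) = (x :: l) ++ [y] := rfl
    rw [hcons]
    have hx : PySem.List.pyGetD ((x :: l) ++ [y]) 0 0 = x := by
      simp [PySem.List.pyGetD]
    have hx2 : PySem.List.pyGetD (x :: l) 0 0 = x := by
      simp [PySem.List.pyGetD]
    rw [hx2, PySem.List.len_eq] at ih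
    have hlen : PySem.List.len ((x :: l) ++ [y]) = ((x :: l).length : Int) + 1 := by
      simp [PySem.List.len_eq]
    rw [hx, hlen, PySem.List.pyRange_one_succ_right
      (by exact_mod_cast List.length_pos_of_ne_nil (by simp)), List.foldl_append]
    have hcongr : List.foldl (pvStepA ((x :: l) ++ [y])) (x, 0, x, 0)
        (PySem.List.pyRange 1 ((x :: l).length : Int))
        = List.foldl (pvStepA (x :: l)) (x, 0, x, 0)
        (PySem.List.pyRange 1 ((x :: l).length : Int)) := by
      apply PySem.List.foldl_congr_mem
      intro acc j hj
      rw [PySem.List.mem_pyRange_one] at hj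
      have h0 : j = (j.toNat : Int) := by omega
      have hlt : j.toNat < (x :: l).length := by omega
      unfold pvStepA
      rw [h0, PySem.List.pyGetD_natCast, PySem.List.pyGetD_natCast,
        List.getD_append _ _ _ _ hlt]
    rw [hcongr, ih]
    simp only [List.foldl_cons, List.foldl_nil]
    exact pvStep_snoc x l y

-- sorted2 with an identity second key IS sorted by the lexicographic key
theorem pvSorted2_lex (xs : List Int) (k1 : Int → Int) :
    PySem.List.sorted2 xs k1 (fun i => i) false
      = PySem.List.sorted xs (fun a => toLex (k1 a, a)) false := by
  rw [PySem.List.sorted_eq_foldl_insertBy]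
  have h : (fun (a b : Int) => decide (k1 a < k1 b) || (!decide (k1 b < k1 a) && decide (a < b)))
      = (fun (a b : Int) => decide (toLex (k1 a, a) < toLex (k1 b, b))) := by
    funext a b
    by_cases h1 : k1 a < k1 b <;> by_cases h2 : k1 b < k1 a
    · exact absurd (lt_trans h1 h2) (lt_irrefl _)
    · simp [Prod.Lex.lt_iff, h1, h2]
    · simp [Prod.Lex.lt_iff, h1, h2, ne_of_gt h2]
    · have he : k1 a = k1 b := le_antisymm (not_lt.mp h2) (not_lt.mp h1)
      simp [Prod.Lex.lt_iff, h1, h2, he]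
  show List.foldl (fun acc x => PySem.List.insertBy
      (fun a b => decide (k1 a < k1 b) || (!decide (k1 b < k1 a) && decide (a < b))) x acc) [] xs = _
  rw [h]

-- head of a sort by an injective key is the key-minimal element
theorem pvHead_sorted (xs : List Int) (key : Int → Lex (Int × Int))
    (hinj : Function.Injective key) (target : Int) (ht : target ∈ xs)
    (hmin : ∀ y ∈ xs, key target ≤ key y) (d : Int) :
    (PySem.List.sorted xs key false).headD d = target := by
  cases hs : PySem.List.sorted xs key false with
  | nil =>
    rw [PySem.List.sorted_eq_nil_iff] at hs
    simp [hs] at ht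
  | cons m t =>
    have hm : m ∈ xs := by
      have := (PySem.List.mem_sorted xs key false m).1 (by rw [hs]; exact List.mem_cons_self)
      exact this
    have h1 := PySem.List.key_head_sorted_le xs key hs target ht
    have h2 := hmin m hm
    simpa using hinj (le_antisymm h1 h2)

-- B's min-sort head is the first argmin index (= A's min_index)
theorem pvHeadMin (x : Int) (t : List Int) :
    (PySem.List.sorted2 (PySem.List.pyRange 0 (PySem.List.len (x :: t)))
        (fun i => PySem.List.pyGetD (x :: t) i 0) (fun i => i)).headD 0
      = (((PySem.List.index? (x :: t)
          ((PySem.List.min? (x :: t) (fun y => y)).getD 0)).getD 0 : Nat) : Int) := by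
  obtain ⟨m, hm⟩ : ∃ m, PySem.List.min? (x :: t) (fun y => y) = some m := by
    cases h : PySem.List.min? (x :: t) (fun y => y) with
    | none => rw [PySem.List.min?_eq_none_iff] at h; simp at h
    | some m => exact ⟨m, rfl⟩
  have hmem : m ∈ x :: t := PySem.List.min?_mem hm
  obtain ⟨i0, hi0⟩ : ∃ i0, PySem.List.index? (x :: t) m = some i0 := by
    cases h : PySem.List.index? (x :: t) m with
    | none => rw [PySem.List.index?_eq_none_iff] at h; exact absurd hmem h
    | some i0 => exact ⟨i0, rfl⟩
  obtain ⟨hk, hget, hfirst⟩ := PySem.List.getElem_of_index?_eq_some hi0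
  rw [hm]
  simp only [Option.getD_some]
  rw [hi0]
  simp only [Option.getD_some]
  rw [pvSorted2_lex]
  refine pvHead_sorted _ _ ?_ ((i0 : Nat) : Int) ?_ ?_ _
  · intro a b h
    have := congrArg (fun p => (ofLex p).2) h
    simpa using this
  · rw [PySem.List.len_eq, PySem.List.mem_pyRange_one]
    constructor
    · exact Int.natCast_nonneg i0
    · exact_mod_cast hk
  · intro y hy
    rw [PySem.List.len_eq, PySem.List.mem_pyRange_one] at hy
    have hy0 : y = (y.toNat : Int) := by omega
    have hylt : y.toNat < (x :: t).length := by omega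
    have hgy : PySem.List.pyGetD (x :: t) y 0 = (x :: t)[y.toNat] := by
      conv_lhs => rw [hy0]
      rw [PySem.List.pyGetD_natCast, List.getD_eq_getElem _ _ hylt]
    have hgt : PySem.List.pyGetD (x :: t) ((i0 : Nat) : Int) 0 = m := by
      rw [PySem.List.pyGetD_natCast, List.getD_eq_getElem _ _ hk, hget]
    rw [Prod.Lex.le_iff]
    simp only [ofLex_toLex, hgy, hgt]
    have hle : m ≤ (x :: t)[y.toNat] := PySem.List.min?_isMin hm _ (List.getElem_mem hylt)
    rcases lt_or_eq_of_le hle with hlt | heq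
    · exact Or.inl hlt
    · refine Or.inr ⟨heq, ?_⟩
      by_contra hcon
      push_neg at hcon
      have hjlt : y.toNat < i0 := by omega
      exact hfirst y.toNat hjlt heq.symm

-- B's max-sort head is the first argmax index (= A's max_index)
theorem pvHeadMax (x : Int) (t : List Int) :
    (PySem.List.sorted2 (PySem.List.pyRange 0 (PySem.List.len (x :: t)))
        (fun i => -(PySem.List.pyGetD (x :: t) i 0)) (fun i => i)).headD 0
      = (((PySem.List.index? (x :: t)
          ((PySem.List.max? (x :: t) (fun y => y)).getD 0)).getD 0 : Nat) : Int) := by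
  obtain ⟨M, hM⟩ : ∃ M, PySem.List.max? (x :: t) (fun y => y) = some M := by
    cases h : PySem.List.max? (x :: t) (fun y => y) with
    | none => rw [PySem.List.max?_eq_none_iff] at h; simp at h
    | some M => exact ⟨M, rfl⟩
  have hmem : M ∈ x :: t := PySem.List.max?_mem hM
  obtain ⟨i0, hi0⟩ : ∃ i0, PySem.List.index? (x :: t) M = some i0 := by
    cases h : PySem.List.index? (x :: t) M with
    | none => rw [PySem.List.index?_eq_none_iff] at h; exact absurd hmem h
    | some i0 => exact ⟨i0, rfl⟩
  obtain ⟨hk, hget, hfirst⟩ := PySem.List.getElem_of_index?_eq_some hi0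
  rw [hM]
  simp only [Option.getD_some]
  rw [hi0]
  simp only [Option.getD_some]
  rw [pvSorted2_lex]
  refine pvHead_sorted _ _ ?_ ((i0 : Nat) : Int) ?_ ?_ _
  · intro a b h
    have := congrArg (fun p => (ofLex p).2) h
    simpa using this
  · rw [PySem.List.len_eq, PySem.List.mem_pyRange_one]
    constructor
    · exact Int.natCast_nonneg i0
    · exact_mod_cast hk
  · intro y hy
    rw [PySem.List.len_eq, PySem.List.mem_pyRange_one] at hy
    have hy0 : y = (y.toNat : Int) := by omega
    have hylt : y.toNat < (x :: t).length := by omega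
    have hgy : PySem.List.pyGetD (x :: t) y 0 = (x :: t)[y.toNat] := by
      conv_lhs => rw [hy0]
      rw [PySem.List.pyGetD_natCast, List.getD_eq_getElem _ _ hylt]
    have hgt : PySem.List.pyGetD (x :: t) ((i0 : Nat) : Int) 0 = M := by
      rw [PySem.List.pyGetD_natCast, List.getD_eq_getElem _ _ hk, hget]
    rw [Prod.Lex.le_iff]
    simp only [ofLex_toLex, hgy, hgt]
    have hle : (x :: t)[y.toNat] ≤ M := PySem.List.max?_isMax hM _ (List.getElem_mem hylt)
    rcases lt_or_eq_of_le hle with hlt | heq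
    · exact Or.inl (by omega)
    · refine Or.inr ⟨by omega, ?_⟩
      by_contra hcon
      push_neg at hcon
      have hjlt : y.toNat < i0 := by omega
      exact hfirst y.toNat hjlt heq

-- reading the list back at the first index of v gives v
theorem pvGet_index_getD (arr : List Int) (v : Int) (hv : v ∈ arr) :
    PySem.List.pyGetD arr ((((PySem.List.index? arr v).getD 0 : Nat)) : Int) 0 = v := by
  obtain ⟨i0, hi0⟩ : ∃ i0, PySem.List.index? arr v = some i0 := by
    cases h : PySem.List.index? arr v with
    | none => rw [PySem.List.index?_eq_none_iff] at h; exact absurd hv h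
    | some i0 => exact ⟨i0, rfl⟩
  obtain ⟨hk, hget, _⟩ := PySem.List.getElem_of_index?_eq_some hi0
  rw [hi0]
  simp only [Option.getD_some]
  rw [PySem.List.pyGetD_natCast, List.getD_eq_getElem _ _ hk, hget]

-- when left > right the subsegment arr[left:right+1] is empty
theorem pvSlice_empty (arr : List Int) (p q : Nat)
    (h : (↑(max q p) : Int) - 1 < ↑(min q p) + 1) :
    PySem.List.slice arr (some ((↑(min q p) : Int) + 1)) (some ((↑(max q p) : Int) - 1 + 1)) = [] := by
  have h1 : (↑(min q p) : Int) + 1 = ((min q p + 1 : Nat) : Int) := by push_cast; ring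
  have h2 : (↑(max q p) : Int) - 1 + 1 = ((max q p : Nat) : Int) := by ring
  rw [h1, h2, PySem.List.slice_natCast]
  have : max q p - (min q p + 1) = 0 := by omega
  simp [this]

-- ===== VERDICT (by name: the statement is the Claim_ definition above) =====
theorem sum_negatives_between_extremes_spec : Claim_equal_sum_negatives_between_extremes := by
  intro arr _
  unfold Spec_sum_negatives_between_extremes
  match arr with
  | [] => rfl
  | x :: t =>
    unfold sum_negatives_between_extremes sum_negatives_between_extremes_alt
    simp only [List.length_cons, Nat.succ_ne_zero, ite_false]
    rw [pvLoop_spec x t, pvHeadMin x t, pvHeadMax x t]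
    obtain ⟨M, hM⟩ : ∃ M, PySem.List.max? (x :: t) (fun y => y) = some M := by
      cases h : PySem.List.max? (x :: t) (fun y => y) with
      | none => rw [PySem.List.max?_eq_none_iff] at h; simp at h
      | some M => exact ⟨M, rfl⟩
    obtain ⟨m, hm⟩ : ∃ m, PySem.List.min? (x :: t) (fun y => y) = some m := by
      cases h : PySem.List.min? (x :: t) (fun y => y) with
      | none => rw [PySem.List.min?_eq_none_iff] at h; simp at h
      | some m => exact ⟨m, rfl⟩
    have hMv : PySem.List.pyGetD (x :: t)
        ((((PySem.List.index? (x :: t) ((PySem.List.max? (x :: t) (fun y => y)).getD 0)).getD 0 : Nat)) : Int) 0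
        = (PySem.List.max? (x :: t) (fun y => y)).getD 0 :=
      pvGet_index_getD _ _ (by rw [hM]; exact PySem.List.max?_mem hM)
    have hmv : PySem.List.pyGetD (x :: t)
        ((((PySem.List.index? (x :: t) ((PySem.List.min? (x :: t) (fun y => y)).getD 0)).getD 0 : Nat)) : Int) 0
        = (PySem.List.min? (x :: t) (fun y => y)).getD 0 :=
      pvGet_index_getD _ _ (by rw [hm]; exact PySem.List.min?_mem hm)
    unfold pvSpecState
    rw [hMv, hmv]
    set p := (PySem.List.index? (x :: t) ((PySem.List.max? (x :: t) (fun y => y)).getD 0)).getD 0 with hp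
    set q := (PySem.List.index? (x :: t) ((PySem.List.min? (x :: t) (fun y => y)).getD 0)).getD 0 with hq
    split_ifs with h
    · have hmin : (min (↑q) (↑p) : Int) = ↑(min q p) := (Nat.cast_min q p).symm
      have hmax : (max (↑q) (↑p) : Int) = ↑(max q p) := (Nat.cast_max q p).symm
      rw [hmin, hmax] at h ⊢
      rw [pvSlice_empty (x :: t) p q h]
      rfl
    · rfl
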